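-- pv_equiv track=rewrite | github.com/WaldenRUC/UFOSys | ufo/extractor/ufo_extractor.py | split_list_by_shape
-- ===== SOURCE A (Python) =====
-- def split_list_by_shape(list_a, shape_b):
--     """
--     将列表A按照列表B的形状分割
--
--     参数:
--         list_a: 要分割的列表
--         shape_b: 包含整数的列表，指定每个子列表的长度
--
--     返回:
--         分割后的列表的列表
--     """
--     result = []
--     index = 0
--     for length in shape_b:
--         if index + length > len(list_a):
--             raise ValueError("列表A的长度不足以按照B的形状分割")
--         result.append(list_a[index:index+length])
--         index += length
--     return result
-- ===== SOURCE B (Python) =====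
-- def split_list_by_shape(list_a, shape_b):
--     # Precompute the cumulative boundary table, validate it once, then slice
--     # between consecutive boundaries in a single comprehension.
--     bounds = []
--     s = 0
--     for x in shape_b:
--         s += x
--         bounds.append(s)
--     if any(b > len(list_a) for b in bounds):
--         raise ValueError("列表A的长度不足以按照B的形状分割")
--     return [list_a[i:j] for i, j in zip([0] + bounds[:-1], bounds)]
-- ===== Notes on version B (the rewrite author's own statement) =====
-- stated objective: alternative
-- what changed: Replaces A's sequential running-index loop (validate-and-slice at each step) with a precomputed cumulative-boundary table validated once by any(), followed by a comprehension slicing between consecutive boundaries zipped together.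
import Mathlib
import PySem

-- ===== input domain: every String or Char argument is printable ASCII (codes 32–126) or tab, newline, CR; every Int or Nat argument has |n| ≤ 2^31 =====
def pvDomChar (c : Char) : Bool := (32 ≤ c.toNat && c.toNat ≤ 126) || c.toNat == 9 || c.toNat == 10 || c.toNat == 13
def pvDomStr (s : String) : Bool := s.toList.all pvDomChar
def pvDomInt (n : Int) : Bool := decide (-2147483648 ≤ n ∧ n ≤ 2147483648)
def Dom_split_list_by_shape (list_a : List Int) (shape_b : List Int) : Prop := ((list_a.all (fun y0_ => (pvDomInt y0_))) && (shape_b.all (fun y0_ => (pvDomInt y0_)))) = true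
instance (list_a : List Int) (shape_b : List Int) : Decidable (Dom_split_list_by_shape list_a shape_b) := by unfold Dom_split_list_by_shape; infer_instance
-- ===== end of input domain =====

-- B replaces A's sequential running-index loop by a precomputed cumulative
-- boundary table validated once, then slices between consecutive boundaries
-- (objective: alternative decomposition, same cost).

-- ===== PORT A =====
-- the for-loop of A: state = (result, index); the raise branch returns the
-- current result (those inputs are excluded by Pre_)
def pvGoA (la : List Int) : List Int → Int → List (List Int) → List (List Int)
  | [], _, res => res
  | l :: rest, idx, res =>
    if (la.length : Int) < idx + l then res  -- ValueError in Python
    else pvGoA la rest (idx + l) (res ++ [PySem.List.slice la (some idx) (some (idx + l))])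

def split_list_by_shape (list_a : List Int) (shape_b : List Int) : List (List Int) :=
  pvGoA list_a shape_b 0 []

-- ===== PORT B =====
-- the accumulation loop of Source B: bounds.append(s) with running s
def pvAccB : List Int → Int → List Int → List Int
  | [], _, bs => bs
  | x :: rest, s, bs => pvAccB rest (s + x) (bs ++ [s + x])

def split_list_by_shape_alt (list_a : List Int) (shape_b : List Int) : List (List Int) :=
  if (pvAccB shape_b 0 []).any (fun b => (list_a.length : Int) < b) then []  -- ValueError in Python
  else ((0 :: (pvAccB shape_b 0 []).dropLast).zip (pvAccB shape_b 0 [])).map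
    (fun p => PySem.List.slice list_a (some p.1) (some p.2))

-- ===== PRECONDITION & SPEC =====
-- Pre_ excludes exactly the inputs on which A raises ValueError: some prefix
-- sum of shape_b exceeds len(list_a).
def Pre_split_list_by_shape (list_a : List Int) (shape_b : List Int) : Prop :=
  ∀ i : Nat, i < shape_b.length → (shape_b.take (i + 1)).sum ≤ (list_a.length : Int)
instance (list_a : List Int) (shape_b : List Int) : Decidable (Pre_split_list_by_shape list_a shape_b) := by
  unfold Pre_split_list_by_shape; infer_instance

def pvWitness_split_list_by_shape : List Int × List Int := ([1, 2, 3], [1, 2])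

def Spec_split_list_by_shape (list_a : List Int) (shape_b : List Int) (out : List (List Int)) : Prop := out = split_list_by_shape_alt list_a shape_b
instance (list_a : List Int) (shape_b : List Int) (out : List (List Int)) : Decidable (Spec_split_list_by_shape list_a shape_b out) := by unfold Spec_split_list_by_shape; infer_instance

-- ===== CLAIM (what is proved, stated in full; the proofs are below) =====
def Claim_equal_split_list_by_shape : Prop := ∀ (list_a : List Int) (shape_b : List Int), Dom_split_list_by_shape list_a shape_b → Pre_split_list_by_shape list_a shape_b → Spec_split_list_by_shape list_a shape_b (split_list_by_shape list_a shape_b)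

-- ===== LEMMAS AND PROOFS =====

-- prefix-sum scan: the values A's index takes / B's bounds
def pvScan : List Int → Int → List Int
  | [], _ => []
  | x :: r, s => (s + x) :: pvScan r (s + x)

-- common reference shape: the list of slices
def pvSpecF (la : List Int) : List Int → Int → List (List Int)
  | [], _ => []
  | l :: r, idx =>
    PySem.List.slice la (some idx) (some (idx + l)) :: pvSpecF la r (idx + l)

theorem pvAccB_eq (r : List Int) : ∀ (s : Int) (bs : List Int),
    pvAccB r s bs = bs ++ pvScan r s := by
  induction r with
  | nil => intro s bs; simp [pvAccB, pvScan]
  | cons x r ih => intro s bs; simp [pvAccB, pvScan, ih]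

theorem pvScan_le (L : Int) (r : List Int) : ∀ (s : Int),
    (∀ i : Nat, i < r.length → s + (r.take (i + 1)).sum ≤ L) →
    ∀ p ∈ pvScan r s, p ≤ L := by
  induction r with
  | nil => intro s _ p hp; simp [pvScan] at hp
  | cons x r ih =>
    intro s h p hp
    simp only [pvScan, List.mem_cons] at hp
    rcases hp with rfl | hp
    · have := h 0 (by simp)
      simpa using this
    · exact ih (s + x) (fun i hi => by
        have := h (i + 1) (by simpa using Nat.succ_lt_succ hi)
        simp [List.take_succ_cons] at this ⊢
        omega) p hp

theorem pvGoA_eq (la : List Int) (r : List Int) : ∀ (idx : Int) (res : List (List Int)),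
    (∀ p ∈ pvScan r idx, p ≤ (la.length : Int)) →
    pvGoA la r idx res = res ++ pvSpecF la r idx := by
  induction r with
  | nil => intro idx res _; simp [pvGoA, pvSpecF]
  | cons l r ih =>
    intro idx res h
    have hle : idx + l ≤ (la.length : Int) := h _ (by simp [pvScan])
    have hrest : ∀ p ∈ pvScan r (idx + l), p ≤ (la.length : Int) := fun p hp =>
      h p (by simp [pvScan, hp])
    simp only [pvGoA, pvSpecF]
    rw [if_neg (by omega), ih (idx + l) _ hrest]
    simp

theorem pvZip_eq (la : List Int) (r : List Int) : ∀ (s : Int),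
    ((s :: (pvScan r s).dropLast).zip (pvScan r s)).map
      (fun p => PySem.List.slice la (some p.1) (some p.2)) = pvSpecF la r s := by
  induction r with
  | nil => intro s; simp [pvScan, pvSpecF]
  | cons x r ih =>
    intro s
    cases r with
    | nil => simp [pvScan, pvSpecF]
    | cons y r' =>
      have := ih (s + x)
      simp only [pvScan, pvSpecF] at this ⊢
      simp only [List.dropLast, List.zip_cons_cons, List.map_cons] at this ⊢
      rw [this]

-- ===== VERDICT (by name: the statement is the Claim_ definition above) =====
theorem split_list_by_shape_spec : Claim_equal_split_list_by_shape := by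
  intro la sb _ hpre
  unfold Spec_split_list_by_shape split_list_by_shape split_list_by_shape_alt
  have hb : pvAccB sb 0 [] = pvScan sb 0 := by simp [pvAccB_eq]
  have hle : ∀ p ∈ pvScan sb 0, p ≤ (la.length : Int) :=
    pvScan_le _ sb 0 (fun i hi => by simpa using hpre i hi)
  have hany : (pvScan sb 0).any (fun b => (la.length : Int) < b) = false := by
    simp only [List.any_eq_false, decide_eq_true_eq, not_lt]
    exact hle
  rw [hb, pvGoA_eq la sb 0 [] hle, if_neg (by simp [hany]), pvZip_eq la sb 0]
  simp
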